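-- pv_equiv track=rewrite | github.com/Omarzintan/bumblebee-ai | features/youtube_search.py | get_search_query
-- ===== SOURCE A (Python) =====
-- def get_search_query(spoken_text, patterns):
--     search_terms = ['about', 'on', 'for', 'search']
--     query_found = False
--
--     for search_term in search_terms:
--         if search_term in spoken_text:
--             search_index = spoken_text.index(search_term)
--             # get everything after the search term
--             spoken_text = spoken_text[search_index+1:]
--             query_found = True
--             break
--
--     # In case none of the search terms are included in spoken_text.
--     if not query_found:
--         for phrase in patterns:
--             # split the phrase into individual words
--             phrase_list = phrase.split(' ')
--             # remove phrase list from spoken_text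
--             spoken_text = [word for word in spoken_text if word not in phrase_list]
--
--     return ' '.join(spoken_text)
-- ===== SOURCE B (Python) =====
-- def get_search_query(spoken_text, patterns):
--     TERMS = ('about', 'on', 'for', 'search')
--     # one pass over spoken_text: first-occurrence index of each search term
--     occ = {}
--     for i, w in enumerate(spoken_text):
--         if w in TERMS and w not in occ:
--             occ[w] = i
--     for t in TERMS:
--         if t in occ:
--             return ' '.join(spoken_text[occ[t] + 1:])
--     # fallback: one union set of all pattern words, one filtering pass
--     excluded = set()
--     for phrase in patterns:
--         excluded.update(phrase.split(' '))
--     return ' '.join(w for w in spoken_text if w not in excluded)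
-- ===== Notes on version B (the rewrite author's own statement) =====
-- stated objective: faster
-- what changed: B scans spoken_text once, building a first-occurrence index dict for the four search terms, then resolves the chosen term by dict lookup (instead of A's per-term membership test plus .index rescan of the list); the fallback builds one union set of all pattern words and filters spoken_text in a single pass instead of rebuilding the word list once per phrase with a linear list-membership test inside.
import Mathlib
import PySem

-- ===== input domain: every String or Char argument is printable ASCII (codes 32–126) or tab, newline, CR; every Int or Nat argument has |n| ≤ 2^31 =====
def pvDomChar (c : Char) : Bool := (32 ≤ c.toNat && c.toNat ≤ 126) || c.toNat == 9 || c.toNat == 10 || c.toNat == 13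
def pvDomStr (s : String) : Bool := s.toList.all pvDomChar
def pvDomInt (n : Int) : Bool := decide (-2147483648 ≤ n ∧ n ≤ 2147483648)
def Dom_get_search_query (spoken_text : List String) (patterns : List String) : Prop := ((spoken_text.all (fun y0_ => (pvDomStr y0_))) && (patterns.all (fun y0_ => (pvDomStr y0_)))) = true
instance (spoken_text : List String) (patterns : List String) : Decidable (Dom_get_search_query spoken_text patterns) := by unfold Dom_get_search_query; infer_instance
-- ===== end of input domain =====

-- B replaces A's per-term membership test plus .index rescan by ONE pass over spoken_text
-- building a first-occurrence index dict for the search terms, and B's fallback filters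
-- spoken_text once against a prebuilt union set of all pattern words (objective: faster).

-- phrase.split(' '): exact via PySem.Str.split? (the separator " " is non-empty, so split? is always `some`)
def gsqSplitSp (phrase : String) : List String := (PySem.Str.split? phrase " ").getD []

-- ===== PORT A =====
-- the for-loop over search_terms with `break`: returns the (possibly sliced)
-- spoken_text together with query_found
def gsqA_loop : List String → List String → (List String × Bool)
  | [], st => (st, false)
  | t :: ts, st =>
    if st.contains t then
      match PySem.List.index? st t with
      | some i => (PySem.List.slice st (some ((i : Int) + 1)) none, true)
      | none => (st, false)   -- unreachable: contains guarantees index? = some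
    else gsqA_loop ts st

def get_search_query (spoken_text : List String) (patterns : List String) : String :=
  let p := gsqA_loop ["about", "on", "for", "search"] spoken_text
  let st :=
    if !p.2 then
      patterns.foldl
        (fun acc phrase =>
          acc.filter (fun w => !((gsqSplitSp phrase).contains w))) p.1
    else p.1
  PySem.Str.join " " st

-- ===== PORT B =====
def gsqTerms : List String := ["about", "on", "for", "search"]

-- the single enumerate pass: first-occurrence index of each search term
def gsqOcc (st : List String) : PySem.Dict String Int :=
  (PySem.List.enumerate st).foldl
    (fun d p =>
      if gsqTerms.contains p.2 && !(PySem.Dict.contains d p.2) then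
        PySem.Dict.insert d p.2 p.1
      else d)
    PySem.Dict.empty

-- the lookup loop with early `return`
def gsqB_try (st : List String) (occ : PySem.Dict String Int) : List String → Option String
  | [] => none
  | t :: ts =>
    match PySem.Dict.get? occ t with
    | some i => some (PySem.Str.join " " (PySem.List.slice st (some (i + 1)) none))
    | none => gsqB_try st occ ts

def get_search_query_alt (spoken_text : List String) (patterns : List String) : String :=
  match gsqB_try spoken_text (gsqOcc spoken_text) gsqTerms with
  | some r => r
  | none =>
    let excluded : PySem.Set String :=
      patterns.foldl (fun s phrase => PySem.Set.update s (gsqSplitSp phrase))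
        PySem.Set.empty
    PySem.Str.join " " (spoken_text.filter (fun w => !(PySem.Set.contains excluded w)))

-- ===== PRECONDITION & SPEC =====
def Spec_get_search_query (spoken_text : List String) (patterns : List String) (out : String) : Prop := out = get_search_query_alt spoken_text patterns
instance (spoken_text : List String) (patterns : List String) (out : String) : Decidable (Spec_get_search_query spoken_text patterns out) := by unfold Spec_get_search_query; infer_instance

-- ===== CLAIM (what is proved, stated in full; the proofs are below) =====
def Claim_equal_get_search_query : Prop := ∀ (spoken_text : List String) (patterns : List String), Dom_get_search_query spoken_text patterns → Spec_get_search_query spoken_text patterns (get_search_query spoken_text patterns)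

-- ===== LEMMAS AND PROOFS =====

-- what the enumerate fold stores: the first index of each not-yet-seen search term
lemma gsq_occ_fold (xs : List String) (s : Int) (d : PySem.Dict String Int) (t : String) :
    ((PySem.List.enumerate xs s).foldl
        (fun d p =>
          if gsqTerms.contains p.2 && !(PySem.Dict.contains d p.2) then
            PySem.Dict.insert d p.2 p.1
          else d) d).get? t
      = if gsqTerms.contains t && !(d.contains t) then
          match PySem.List.index? xs t with
          | some k => some (s + (k : Int))
          | none => d.get? t
        else d.get? t := by
  induction xs generalizing s d with
  | nil => simp [PySem.List.enumerate_nil, PySem.List.index?]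
  | cons x xs ih =>
    rw [PySem.List.enumerate_cons, List.foldl_cons]
    by_cases hx : (gsqTerms.contains x && !(d.contains x)) = true
    · simp only [hx, if_pos]
      by_cases ht : t = x
      · subst ht
        rw [ih, PySem.Dict.contains_insert_self, PySem.Dict.get?_insert_self,
          if_pos hx, PySem.List.index?_cons_self]
        simp
      · have hg : (d.insert x s).get? t = d.get? t := by
          rw [PySem.Dict.get?_insert]; simp [ht]
        have hc : (d.insert x s).contains t = d.contains t := by
          rw [PySem.Dict.contains_insert]; simp [ht]
        rw [ih, hc, hg, PySem.List.index?_cons_of_ne xs (Ne.symm ht)]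
        cases hidx : PySem.List.index? xs t with
        | none => simp
        | some k =>
          simp only [Option.map_some]
          split_ifs with hcond
          · simp only [Option.some.injEq]; push_cast; ring
          · rfl
    · simp only [hx, if_neg, Bool.not_eq_true]
      rw [ih]
      by_cases ht : t = x
      · subst ht
        simp only [hx, Bool.false_eq_true]
        rfl
      · rw [PySem.List.index?_cons_of_ne xs (Ne.symm ht)]
        cases hidx : PySem.List.index? xs t with
        | none => simp
        | some k =>
          simp only [Option.map_some]
          split_ifs with hcond
          · simp only [Option.some.injEq]; push_cast; ring
          · rfl

-- the dict built by gsqOcc answers exactly like list.index on the search terms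
lemma gsq_occ_get (st : List String) (t : String) :
    (gsqOcc st).get? t =
      if gsqTerms.contains t then (PySem.List.index? st t).map (fun k => (k : Int))
      else none := by
  unfold gsqOcc
  rw [gsq_occ_fold]
  simp only [PySem.Dict.contains_empty, Bool.not_false, Bool.and_true, PySem.Dict.get?_empty]
  split_ifs with h
  · cases hidx : PySem.List.index? st t with
    | none => simp
    | some k => simp
  · rfl

-- the two filter predicates agree pointwise once the set absorbs the phrase
lemma gsq_pred_step (s0 : PySem.Set String) (xs : List String) (w : String) :
    (!(PySem.Set.contains (PySem.Set.update s0 xs) w)) =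
      (!(PySem.Set.contains s0 w) && !(xs.contains w)) := by
  have h : PySem.Set.contains (PySem.Set.update s0 xs) w =
      (PySem.Set.contains s0 w || xs.contains w) := by
    rw [Bool.eq_iff_iff]
    simp [PySem.Set.mem_update]
  rw [h, Bool.not_or]

-- per-phrase repeated filtering = one filter against the accumulated union set
lemma gsq_fold_filter (patterns : List String) (st : List String) (s0 : PySem.Set String) :
    patterns.foldl
        (fun acc phrase =>
          acc.filter (fun w => !((gsqSplitSp phrase).contains w)))
        (st.filter (fun w => !(PySem.Set.contains s0 w)))
      = st.filter (fun w =>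
          !(PySem.Set.contains
              (patterns.foldl
                (fun s phrase => PySem.Set.update s (gsqSplitSp phrase)) s0) w)) := by
  induction patterns generalizing s0 with
  | nil => simp
  | cons p ps ih =>
    simp only [List.foldl_cons]
    have h : (List.filter (fun w => !(PySem.Set.contains s0 w)) st).filter
        (fun w => !((gsqSplitSp p).contains w))
        = st.filter (fun w => !(PySem.Set.contains (PySem.Set.update s0 (gsqSplitSp p)) w)) := by
      rw [List.filter_filter]
      apply List.filter_congr
      intro w _
      rw [gsq_pred_step, Bool.and_comm]
    rw [h, ih]

-- the fallback of A (starting from st, found = false) equals the fallback of B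
lemma gsq_fallback (patterns : List String) (st : List String) :
    patterns.foldl
        (fun acc phrase =>
          acc.filter (fun w => !((gsqSplitSp phrase).contains w))) st
      = st.filter (fun w =>
          !(PySem.Set.contains
              (patterns.foldl
                (fun s phrase => PySem.Set.update s (gsqSplitSp phrase))
                PySem.Set.empty) w)) := by
  have h0 : st = st.filter (fun w => !(PySem.Set.contains PySem.Set.empty w)) := by
    simp [PySem.Set.empty]
  conv_lhs => rw [h0]
  exact gsq_fold_filter patterns st PySem.Set.empty

-- A's break-loop over terms ⊆ gsqTerms corresponds to B's dict-lookup loop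
lemma gsq_loop (terms : List String) (hsub : ∀ t ∈ terms, t ∈ gsqTerms)
    (st : List String) (patterns : List String) :
    (let p := gsqA_loop terms st
     PySem.Str.join " "
       (if !p.2 then
          patterns.foldl
            (fun acc phrase =>
              acc.filter (fun w => !((gsqSplitSp phrase).contains w))) p.1
        else p.1))
    = match gsqB_try st (gsqOcc st) terms with
      | some r => r
      | none =>
        PySem.Str.join " " (st.filter (fun w =>
          !(PySem.Set.contains
              (patterns.foldl
                (fun s phrase => PySem.Set.update s (gsqSplitSp phrase))
                PySem.Set.empty) w))) := by
  induction terms with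
  | nil => exact congrArg (PySem.Str.join " ") (gsq_fallback patterns st)
  | cons t ts ih =>
    have htT : gsqTerms.contains t = true := by
      simpa using hsub t (List.mem_cons_self)
    have hocc := gsq_occ_get st t
    rw [htT, if_pos rfl] at hocc
    by_cases hc : st.contains t
    · have hm : t ∈ st := by simpa using hc
      obtain ⟨i, hi⟩ := Option.isSome_iff_exists.mp
        ((PySem.List.index?_isSome_iff st t).mpr hm)
      rw [hi] at hocc
      simp at hocc
      rw [PySem.List.index?_eq_idxOf?] at hi
      simp [gsqA_loop, gsqB_try, hm, hi, hocc]
    · have hm' : t ∉ st := by simpa using hc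
      have hnone : PySem.List.index? st t = none :=
        (PySem.List.index?_eq_none_iff st t).mpr hm'
      rw [hnone] at hocc
      simp at hocc
      have hB : gsqB_try st (gsqOcc st) (t :: ts) = gsqB_try st (gsqOcc st) ts := by
        simp [gsqB_try, hocc]
      rw [hB]
      have hA : gsqA_loop (t :: ts) st = gsqA_loop ts st := by
        simp [gsqA_loop, hm']
      rw [hA]
      exact ih (fun u hu => hsub u (List.mem_cons_of_mem t hu))

-- ===== VERDICT (by name: the statement is the Claim_ definition above) =====
theorem get_search_query_spec : Claim_equal_get_search_query := by
  intro st patterns _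
  show _ = _
  unfold get_search_query get_search_query_alt
  exact gsq_loop gsqTerms (fun t h => h) st patterns
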